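-- pv_equiv track=rewrite | github.com/dakopen/AusspracheTrainer-BWKI | main/Auswertung.py | sprachfehler_finden
-- ===== SOURCE A (Python) =====
-- def sprachfehler_finden(matchings, aussprachefehler):
--     sprachfehler_counter = 0
--     for matching in matchings.values():
--         if str(matching[0]).strip() != str(matching[1]).strip():  # unterscheiden sich
--             if any(sprachfehler for sprachfehler in aussprachefehler.keys() if any(laut for laut in sprachfehler if laut in matching[0])) and any(sprachfehler for sprachfehler in aussprachefehler.values() if any(laut for laut in sprachfehler if laut in matching[1])):
--                 sprachfehler_counter += 1
--             elif any(sprachfehler for sprachfehler in aussprachefehler.values() if any(laut for laut in sprachfehler if laut in matching[0])) and any(sprachfehler for sprachfehler in aussprachefehler.keys() if any(laut for laut in sprachfehler if laut in matching[1])):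
--                 sprachfehler_counter += 1
--
--     return sprachfehler_counter
-- ===== SOURCE B (Python) =====
-- def sprachfehler_finden(matchings, aussprachefehler):
--     # Flatten the nonempty lauts of the error dict's keys and values into two
--     # hash sets once; then test a string by enumerating its substrings (up to
--     # the longest laut) and looking them up, instead of scanning all patterns.
--     key_lauts = {laut for sp in aussprachefehler.keys() for laut in sp if laut}
--     val_lauts = {laut for sp in aussprachefehler.values() for laut in sp if laut}
--     maxlen = 0
--     for laut in key_lauts | val_lauts:
--         maxlen = max(maxlen, len(laut))
--
--     def hit(lauts, s):
--         return any(s[i:j] in lauts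
--                    for i in range(len(s))
--                    for j in range(i + 1, min(i + maxlen, len(s)) + 1))
--
--     count = 0
--     for m in matchings.values():
--         a, b = m[0], m[1]
--         if str(a).strip() != str(b).strip():
--             if (hit(key_lauts, a) and hit(val_lauts, b)) or \
--                (hit(val_lauts, a) and hit(key_lauts, b)):
--                 count += 1
--     return count
-- ===== Notes on version B (the rewrite author's own statement) =====
-- stated objective: alternative
-- what changed: B flattens the nonempty lauts of the error dict's keys and values into two hash sets once and tests each differing matching string by enumerating its substrings (bounded by the longest laut) against those sets, instead of rescanning the nested sprachfehler groups of the dict for every matching; the if/elif pair becomes a single disjunction.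
import Mathlib
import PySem

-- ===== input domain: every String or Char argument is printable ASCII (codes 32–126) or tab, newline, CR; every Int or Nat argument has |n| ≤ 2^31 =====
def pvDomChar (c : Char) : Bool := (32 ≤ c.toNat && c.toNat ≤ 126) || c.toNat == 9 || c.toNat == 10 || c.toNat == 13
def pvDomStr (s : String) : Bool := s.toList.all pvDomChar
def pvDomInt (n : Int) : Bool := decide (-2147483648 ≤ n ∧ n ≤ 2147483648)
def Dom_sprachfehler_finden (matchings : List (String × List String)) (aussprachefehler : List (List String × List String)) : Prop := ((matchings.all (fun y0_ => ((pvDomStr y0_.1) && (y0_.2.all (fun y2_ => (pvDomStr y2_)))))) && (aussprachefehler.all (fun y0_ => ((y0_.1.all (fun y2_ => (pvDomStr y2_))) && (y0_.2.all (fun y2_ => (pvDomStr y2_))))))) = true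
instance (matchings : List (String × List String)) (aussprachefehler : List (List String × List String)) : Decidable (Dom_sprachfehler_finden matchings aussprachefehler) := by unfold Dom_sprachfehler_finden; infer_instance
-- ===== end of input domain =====

-- B flattens the nonempty lauts into two hash sets once and tests a string by
-- enumerating its substrings (bounded by the longest laut) against those sets,
-- instead of rescanning the nested sprachfehler groups of the dict per matching.
-- ===== PORT A =====
def pyAnyLaut (sp : List String) (s : String) : Bool :=
  sp.any (fun laut => PySem.Str.isIn laut s && laut != "")

def pyAnySp (l : List (List String)) (s : String) : Bool :=
  l.any (fun sp => pyAnyLaut sp s && !sp.isEmpty)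

def sprachfehler_finden (matchings : List (String × List String)) (aussprachefehler : List (List String × List String)) : Int :=
  let md := PySem.Dict.ofList matchings
  let ad := PySem.Dict.ofList aussprachefehler
  md.values.foldl (fun c m =>
    let m0 := PySem.List.pyGetD m 0 ""
    let m1 := PySem.List.pyGetD m 1 ""
    if PySem.Str.strip m0 != PySem.Str.strip m1 then
      if pyAnySp ad.keys m0 && pyAnySp ad.values m1 then c + 1
      else if pyAnySp ad.values m0 && pyAnySp ad.keys m1 then c + 1
      else c
    else c) 0

-- ===== PORT B =====
def altLauts (l : List (List String)) : PySem.Set String :=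
  PySem.Set.ofList ((l.flatMap id).filter (fun laut => laut != ""))

def altMaxlen (lauts : PySem.Set String) : Int :=
  lauts.foldl (fun m laut => max m (PySem.Str.len laut)) 0

def altHit (lauts : PySem.Set String) (maxlen : Int) (s : String) : Bool :=
  (PySem.List.pyRange 0 (PySem.Str.len s) 1).any (fun i =>
    (PySem.List.pyRange (i + 1) (min (i + maxlen) (PySem.Str.len s) + 1) 1).any (fun j =>
      PySem.Set.contains lauts (PySem.Str.slice s (some i) (some j))))

def sprachfehler_finden_alt (matchings : List (String × List String)) (aussprachefehler : List (List String × List String)) : Int :=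
  let ad := PySem.Dict.ofList aussprachefehler
  let keyLauts := altLauts ad.keys
  let valLauts := altLauts ad.values
  let maxlen := altMaxlen (PySem.Set.union keyLauts valLauts)
  (PySem.Dict.ofList matchings).values.foldl (fun c m =>
    let a := PySem.List.pyGetD m 0 ""
    let b := PySem.List.pyGetD m 1 ""
    if PySem.Str.strip a != PySem.Str.strip b then
      if (altHit keyLauts maxlen a && altHit valLauts maxlen b) ||
         (altHit valLauts maxlen a && altHit keyLauts maxlen b) then c + 1
      else c
    else c) 0

-- ===== PRECONDITION & SPEC =====
-- Pre_ excludes exactly the inputs where A raises IndexError: some value of the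
-- matchings dict (after Python's duplicate-key collapse) has fewer than 2 entries.
def Pre_sprachfehler_finden (matchings : List (String × List String)) (aussprachefehler : List (List String × List String)) : Prop :=
  ∀ v ∈ (PySem.Dict.ofList matchings).values, 2 ≤ v.length

instance (matchings : List (String × List String)) (aussprachefehler : List (List String × List String)) : Decidable (Pre_sprachfehler_finden matchings aussprachefehler) := by unfold Pre_sprachfehler_finden; infer_instance

def pvWitness_sprachfehler_finden : (List (String × List String)) × (List (List String × List String)) :=
  ([("a", ["hallo", "welt"])], [(["l"], ["w"])])

def Spec_sprachfehler_finden (matchings : List (String × List String)) (aussprachefehler : List (List String × List String)) (out : Int) : Prop := out = sprachfehler_finden_alt matchings aussprachefehler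
instance (matchings : List (String × List String)) (aussprachefehler : List (List String × List String)) (out : Int) : Decidable (Spec_sprachfehler_finden matchings aussprachefehler out) := by unfold Spec_sprachfehler_finden; infer_instance

-- ===== CLAIM (what is proved, stated in full; the proofs are below) =====
def Claim_equal_sprachfehler_finden : Prop := ∀ (matchings : List (String × List String)) (aussprachefehler : List (List String × List String)), Dom_sprachfehler_finden matchings aussprachefehler → Pre_sprachfehler_finden matchings aussprachefehler → Spec_sprachfehler_finden matchings aussprachefehler (sprachfehler_finden matchings aussprachefehler)

-- ===== LEMMAS AND PROOFS =====
-- Every laut collected by altLauts is nonempty.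
lemma altLauts_ne (l : List (List String)) (x : String) (hx : x ∈ altLauts l) : x ≠ "" := by
  unfold altLauts at hx
  rw [PySem.Set.mem_ofList, List.mem_filter] at hx
  simpa using hx.2

-- Every laut of either set is bounded by the fold-max over their union.
lemma len_le_altMaxlen (s t : PySem.Set String) (l : String) (h : l ∈ s ∨ l ∈ t) :
    PySem.Str.len l ≤ altMaxlen (PySem.Set.union s t) := by
  have hmem : l ∈ PySem.Set.union s t := by
    rcases h with h | h <;> simp [pysem, h]
  unfold altMaxlen
  rw [← List.foldl_map (f := PySem.Str.len) (g := fun (m v : Int) => max m v)]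
  exact (PySem.List.le_foldl_max ((PySem.Set.union s t).map PySem.Str.len) 0).2 _
    (List.mem_map_of_mem hmem)

-- A's nested any over the sprachfehler groups finds a nonempty contained laut.
lemma pyAnySp_iff (l : List (List String)) (s : String) :
    pyAnySp l s = true ↔ ∃ x ∈ altLauts l, PySem.Str.isIn x s = true := by
  simp only [pyAnySp, pyAnyLaut, altLauts, List.any_eq_true, Bool.and_eq_true,
    PySem.Set.mem_ofList, List.mem_filter, List.mem_flatMap]
  constructor
  · rintro ⟨sp, hsp, ⟨laut, hl, hin, hne⟩, -⟩
    exact ⟨laut, ⟨⟨sp, hsp, hl⟩, hne⟩, hin⟩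
  · rintro ⟨laut, ⟨⟨sp, hsp, hl⟩, hne⟩, hin⟩
    refine ⟨sp, hsp, ⟨laut, hl, hin, hne⟩, ?_⟩
    simp
    rintro rfl; simp at hl

-- B's bounded substring enumeration hits the set iff some laut of it occurs in s.
lemma altHit_iff (lauts : PySem.Set String) (maxlen : Int) (s : String)
    (hlen : ∀ l ∈ lauts, PySem.Str.len l ≤ maxlen)
    (hne : ∀ l ∈ lauts, l ≠ "") :
    altHit lauts maxlen s = true ↔ ∃ l ∈ lauts, PySem.Str.isIn l s = true := by
  unfold altHit
  simp only [List.any_eq_true, PySem.List.mem_pyRange_one, PySem.Set.contains_iff]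
  constructor
  · rintro ⟨i, ⟨hi0, hilen⟩, j, ⟨hj1, hj2⟩, hmem⟩
    refine ⟨_, hmem, ?_⟩
    rw [PySem.Str.isIn_iff_infix, PySem.Str.toList_slice, PySem.Chars.slice_eq_listSlice,
        PySem.List.slice_toNat]
    · exact (List.take_prefix _ _).isInfix.trans (List.drop_suffix _ _).isInfix
    · omega
    · omega
  · rintro ⟨l, hl, hIn⟩
    rw [PySem.Str.isIn_iff_infix] at hIn
    obtain ⟨pre, post, hsplit⟩ := hIn
    have hnil : l.toList ≠ [] := fun h0 => hne l hl (String.toList_inj.mp (by simpa using h0))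
    have hlen1 : 1 ≤ l.toList.length := List.length_pos_of_ne_nil hnil
    have hslen : s.toList.length = pre.length + l.toList.length + post.length := by
      rw [← hsplit]; simp; omega
    have hll : PySem.Str.len l = (l.toList.length : Int) := by simp [PySem.Str.len_eq]
    have hLs : PySem.Str.len s = (s.toList.length : Int) := by simp [PySem.Str.len_eq]
    have hml := hlen l hl
    rw [hll] at hml
    refine ⟨(pre.length : Int), ⟨by positivity, by rw [hLs]; exact_mod_cast (by omega)⟩,
      (pre.length : Int) + (l.toList.length : Int), ⟨by omega, by rw [hLs]; omega⟩, ?_⟩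
    have heq : (PySem.Str.slice s (some (pre.length : Int))
        (some ((pre.length : Int) + (l.toList.length : Int)))).toList = l.toList := by
      rw [PySem.Str.toList_slice, PySem.Chars.slice_eq_listSlice,
          PySem.List.slice_natCast_add, ← hsplit]
      simp
    have hfin := String.toList_inj.mp heq
    rw [hfin]
    exact hl

-- A's group scan and B's substring lookup agree, per string.
lemma pyAnySp_eq_altHit (K V : List (List String)) (s : String) :
    pyAnySp K s
      = altHit (altLauts K) (altMaxlen (PySem.Set.union (altLauts K) (altLauts V))) s := by
  rw [Bool.eq_iff_iff, pyAnySp_iff,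
    altHit_iff _ _ _ (fun l hl => len_le_altMaxlen _ _ l (Or.inl hl)) (altLauts_ne K)]

lemma pyAnySp_eq_altHit' (K V : List (List String)) (s : String) :
    pyAnySp V s
      = altHit (altLauts V) (altMaxlen (PySem.Set.union (altLauts K) (altLauts V))) s := by
  rw [Bool.eq_iff_iff, pyAnySp_iff,
    altHit_iff _ _ _ (fun l hl => len_le_altMaxlen _ _ l (Or.inr hl)) (altLauts_ne V)]

-- A counts with an if/elif pair, B with a single disjunction: same step.
lemma step_eq (k0 v0 k1 v1 : Bool) (c : Int) :
    (if k0 && v1 then c + 1 else if v0 && k1 then c + 1 else c)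
    = (if (k0 && v1) || (v0 && k1) then c + 1 else c) := by
  cases k0 <;> cases v0 <;> cases k1 <;> cases v1 <;> simp

-- ===== VERDICT (by name: the statement is the Claim_ definition above) =====
theorem sprachfehler_finden_spec : Claim_equal_sprachfehler_finden := by
  intro matchings aussprachefehler _ _
  unfold Spec_sprachfehler_finden sprachfehler_finden sprachfehler_finden_alt
  apply PySem.List.foldl_congr_mem
  intro c m _
  simp only [pyAnySp_eq_altHit (PySem.Dict.ofList aussprachefehler).keys
      (PySem.Dict.ofList aussprachefehler).values,
    pyAnySp_eq_altHit' (PySem.Dict.ofList aussprachefehler).keys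
      (PySem.Dict.ofList aussprachefehler).values,
    step_eq]
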